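-- pv_equiv track=rewrite | github.com/DIDONEproject/musif | musif/extract/features/custom/__harmony_utils.py | parse_chord
-- ===== SOURCE A (Python) =====
-- def parse_chord(first_char):
--     if '(' in first_char:
--         first_char = first_char.split('(')[0]
--     if 'o' in first_char:
--         first_char = first_char.split('o')[0]
--     if '+' in first_char:
--         first_char = first_char.split('+')[0]
--     if '%' in first_char:
--         first_char = first_char.split('%')[0]
--     if 'M' in first_char:
--         first_char = first_char.split('M')[0]
--
--     # look for a number
--     chars = []
--     for character in first_char:
--         if not character.isdigit():
--             chars.append(character)
--         else:
--             break
--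
--     return ''.join(chars)
-- ===== SOURCE B (Python) =====
-- MARKERS = frozenset('(o+%M')
--
-- def parse_chord(first_char):
--     prefix = []
--     for c in first_char:
--         if c in MARKERS or c.isdigit():
--             break
--         prefix.append(c)
--     return ''.join(prefix)
-- ===== Notes on version B (the rewrite author's own statement) =====
-- stated objective: simpler
-- what changed: Replaces five sequential membership-test-plus-split truncations followed by a digit loop with one single pass that collects characters until the first marker or digit.
import Mathlib
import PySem

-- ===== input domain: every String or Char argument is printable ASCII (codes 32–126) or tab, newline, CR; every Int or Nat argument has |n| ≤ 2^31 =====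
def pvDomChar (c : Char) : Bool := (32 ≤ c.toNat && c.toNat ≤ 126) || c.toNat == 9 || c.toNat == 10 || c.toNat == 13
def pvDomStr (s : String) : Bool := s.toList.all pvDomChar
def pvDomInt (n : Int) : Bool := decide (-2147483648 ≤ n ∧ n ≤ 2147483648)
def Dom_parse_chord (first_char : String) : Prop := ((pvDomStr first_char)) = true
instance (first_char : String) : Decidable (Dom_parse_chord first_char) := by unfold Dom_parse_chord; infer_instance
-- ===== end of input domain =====

-- B replaces A's five sequential split-truncations plus digit loop with one single pass
-- that collects characters until the first marker or digit (objective: simpler).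

-- ===== PORT A =====
-- `if sep in s: s = s.split(sep)[0]` for a single-character separator
def pvCut (cs : List Char) (sep : Char) : List Char :=
  if PySem.Chars.isIn [sep] cs then (PySem.Chars.splitOn cs [sep]).headD [] else cs

-- the `for character in first_char: … break` digit loop with its `chars` accumulator
def pvDigitLoop (cs : List Char) (acc : List Char) : List Char :=
  match cs with
  | [] => acc
  | c :: rest => if !(PySem.Chars.isdigit c) then pvDigitLoop rest (acc ++ [c]) else acc

def parse_chord (first_char : String) : String :=
  let s0 := first_char.toList
  let s1 := pvCut s0 '('
  let s2 := pvCut s1 'o'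
  let s3 := pvCut s2 '+'
  let s4 := pvCut s3 '%'
  let s5 := pvCut s4 'M'
  String.ofList (PySem.Chars.join [] ((pvDigitLoop s5 []).map (fun c => [c])))

-- ===== PORT B =====
-- frozenset('(o+%M'); only membership is used
def pvMarkers : List Char := ['(', 'o', '+', '%', 'M']

-- B's single pass: append each character to `prefix` until a marker or digit, then break
def pvAltLoop (cs : List Char) (acc : List Char) : List Char :=
  match cs with
  | [] => acc
  | c :: rest =>
      if pvMarkers.contains c || PySem.Chars.isdigit c then acc
      else pvAltLoop rest (acc ++ [c])

def parse_chord_alt (first_char : String) : String :=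
  String.ofList (PySem.Chars.join [] ((pvAltLoop first_char.toList []).map (fun c => [c])))

-- ===== PRECONDITION & SPEC =====
def Spec_parse_chord (first_char : String) (out : String) : Prop := out = parse_chord_alt first_char
instance (first_char : String) (out : String) : Decidable (Spec_parse_chord first_char out) := by unfold Spec_parse_chord; infer_instance

-- ===== CLAIM (what is proved, stated in full; the proofs are below) =====
def Claim_equal_parse_chord : Prop := ∀ (first_char : String), Dom_parse_chord first_char → Spec_parse_chord first_char (parse_chord first_char)

-- ===== LEMMAS AND PROOFS =====

-- once the accumulator list of pieces is nonempty, the FIRST piece is already fixed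
theorem pv_go_headD_frozen (sep : Char) (fuel : Nat) (l cur : List Char)
    (acc : List (List Char)) (x : List Char) :
    (PySem.Chars.splitOn.go [sep] fuel l cur (acc ++ [x])).headD [] = x := by
  induction fuel generalizing l cur acc with
  | zero => simp [PySem.Chars.splitOn.go]
  | succ n ih =>
      cases l with
      | nil => simp [PySem.Chars.splitOn.go]
      | cons c rest =>
          by_cases h : c = sep
          · subst h
            have hstep : PySem.Chars.splitOn.go [c] (n+1) (c :: rest) cur (acc ++ [x])
                = PySem.Chars.splitOn.go [c] n rest [] ((cur.reverse :: acc) ++ [x]) := by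
              simp [PySem.Chars.splitOn.go, List.isPrefixOf]
            rw [hstep, ih]
          · have hstep : PySem.Chars.splitOn.go [sep] (n+1) (c :: rest) cur (acc ++ [x])
                = PySem.Chars.splitOn.go [sep] n rest (c :: cur) (acc ++ [x]) := by
              simp only [PySem.Chars.splitOn.go, List.isPrefixOf, Bool.and_true]
              rw [if_neg]
              exact fun h' => h (beq_iff_eq.mp h').symm
            rw [hstep, ih]

theorem pv_go_headD (sep : Char) (fuel : Nat) (l cur : List Char) (h : l.length < fuel) :
    (PySem.Chars.splitOn.go [sep] fuel l cur []).headD []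
      = cur.reverse ++ l.takeWhile (fun c => !(c == sep)) := by
  induction fuel generalizing l cur with
  | zero => omega
  | succ n ih =>
      cases l with
      | nil => simp [PySem.Chars.splitOn.go]
      | cons c rest =>
          by_cases hc : c = sep
          · subst hc
            have hstep : PySem.Chars.splitOn.go [c] (n+1) (c :: rest) cur []
                = PySem.Chars.splitOn.go [c] n rest [] ([] ++ [cur.reverse]) := by
              simp [PySem.Chars.splitOn.go, List.isPrefixOf]
            rw [hstep, pv_go_headD_frozen]
            simp [List.takeWhile]
          · have hb : (c == sep) = false := beq_eq_false_iff_ne.mpr hc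
            have hstep : PySem.Chars.splitOn.go [sep] (n+1) (c :: rest) cur []
                = PySem.Chars.splitOn.go [sep] n rest (c :: cur) [] := by
              simp only [PySem.Chars.splitOn.go, List.isPrefixOf, Bool.and_true]
              rw [if_neg]
              exact fun h' => hc (beq_iff_eq.mp h').symm
            rw [hstep, ih rest (c :: cur) (by simpa using Nat.lt_of_succ_lt_succ h)]
            simp [List.takeWhile, hb]

theorem pvCut_eq_takeWhile (cs : List Char) (sep : Char) :
    pvCut cs sep = cs.takeWhile (fun c => !(c == sep)) := by
  unfold pvCut
  split
  · unfold PySem.Chars.splitOn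
    rw [pv_go_headD sep (cs.length + 1) cs [] (by omega)]
    simp
  · next h =>
      have hmem : sep ∉ cs := by
        intro hm
        obtain ⟨l1, l2, rfl⟩ := List.append_of_mem hm
        refine absurd ((PySem.Chars.isIn_iff_infix [sep] _).mpr ⟨l1, l2, ?_⟩)
          (by simpa using h)
        simp
      refine (List.takeWhile_eq_self_iff.mpr ?_).symm
      intro a ha
      simp only [Bool.not_eq_eq_eq_not, Bool.not_true, beq_eq_false_iff_ne, Ne]
      intro h'; exact hmem (h' ▸ ha)

theorem pvDigitLoop_eq (cs acc : List Char) :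
    pvDigitLoop cs acc = acc ++ cs.takeWhile (fun c => !(PySem.Chars.isdigit c)) := by
  induction cs generalizing acc with
  | nil => simp [pvDigitLoop]
  | cons c rest ih =>
      cases hd : PySem.Chars.isdigit c with
      | true => simp [pvDigitLoop, hd, List.takeWhile]
      | false => simp [pvDigitLoop, hd, List.takeWhile, ih]

theorem pvAltLoop_eq (cs acc : List Char) :
    pvAltLoop cs acc
      = acc ++ cs.takeWhile (fun c => !(pvMarkers.contains c || PySem.Chars.isdigit c)) := by
  induction cs generalizing acc with
  | nil => simp [pvAltLoop]
  | cons c rest ih =>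
      by_cases hm : c ∈ pvMarkers <;> cases hd : PySem.Chars.isdigit c <;>
        simp_all [pvAltLoop, List.takeWhile, ih]  -- ih used in the 'false' branches

-- ===== VERDICT (by name: the statement is the Claim_ definition above) =====
-- takeWhile only looks at the predicate pointwise
theorem pv_takeWhile_ext (p q : Char → Bool) (hpq : ∀ c, p c = q c) (l : List Char) :
    l.takeWhile p = l.takeWhile q := by
  induction l with
  | nil => rfl
  | cons c rest ih => simp [List.takeWhile, hpq c, ih]

-- ===== VERDICT (by name: the statement is the Claim_ definition above) =====
theorem parse_chord_spec : Claim_equal_parse_chord := by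
  intro s _
  unfold Spec_parse_chord parse_chord parse_chord_alt
  simp only [pvCut_eq_takeWhile, pvDigitLoop_eq, pvAltLoop_eq, List.nil_append,
    PySem.Chars.join_nil_singletons, List.takeWhile_takeWhile]
  congr 1
  apply pv_takeWhile_ext
  intro c
  cases hd : PySem.Chars.isdigit c <;>
    by_cases h1 : c = '(' <;> by_cases h2 : c = 'o' <;> by_cases h3 : c = '+' <;>
    by_cases h4 : c = '%' <;> by_cases h5 : c = 'M' <;>
    simp_all [pvMarkers]
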